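-- pv_equiv track=rewrite | github.com/iownE9/learn_SICP | CS61A/Resources/Dictionaries/review.py | one_to_one
-- ===== SOURCE A (Python) =====
-- def one_to_one(d):
--     """Returns True if D represents a one-to-one mapping of keys
--     to values.
--
--     >>> d = {'a': 4, 'b': 5, 'c': 3}
--     >>> one_to_one(d)
--     True
--     >>> fail = {'a': 2, 'b': 4, 'c': 2}
--     >>> one_to_one(fail)
--     False
--     """
--     "*** YOUR CODE HERE ***"
--     values = []
--     for v in d.values():
--         if v in values:
--             return False
--         else:
--             values += [v]
--
--     return True
-- ===== SOURCE B (Python) =====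
-- def one_to_one(d):
--     return len(set(d.values())) == len(d)
-- ===== Notes on version B (the rewrite author's own statement) =====
-- stated objective: idiomatic
-- what changed: Replaces the incremental seen-list scan with early return by a single whole-set construction and a cardinality comparison (len(set(values)) == len(d)); no loop, no membership branch, no early exit.
import Mathlib
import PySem

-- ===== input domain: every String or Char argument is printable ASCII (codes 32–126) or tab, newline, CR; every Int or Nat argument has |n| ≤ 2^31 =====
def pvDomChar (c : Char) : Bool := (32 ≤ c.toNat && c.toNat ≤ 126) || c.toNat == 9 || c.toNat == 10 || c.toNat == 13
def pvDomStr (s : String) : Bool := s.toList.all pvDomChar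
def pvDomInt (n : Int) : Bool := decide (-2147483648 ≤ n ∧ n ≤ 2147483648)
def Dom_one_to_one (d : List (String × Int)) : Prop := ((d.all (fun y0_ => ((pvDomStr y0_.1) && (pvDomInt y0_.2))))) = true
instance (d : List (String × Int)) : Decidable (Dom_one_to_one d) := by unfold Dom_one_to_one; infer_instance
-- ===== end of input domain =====

-- B replaces A's incremental seen-list scan with early return by one whole-set construction and a cardinality comparison (objective: idiomatic).


-- ===== PORT A =====
-- the loop `for v in d.values(): if v in values: return False; else: values += [v]`
def one_to_one_go (values : List Int) (vs : List Int) : Bool :=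
  match vs with
  | [] => true
  | v :: rest => if values.contains v then false else one_to_one_go (values ++ [v]) rest

def one_to_one (d : List (String × Int)) : Bool :=
  one_to_one_go [] (d.map Prod.snd)

-- ===== PORT B =====
-- Source B: return len(set(d.values())) == len(d)
def one_to_one_alt (d : List (String × Int)) : Bool :=
  PySem.Set.len (PySem.Set.ofList (d.map Prod.snd)) == d.length


-- ===== PRECONDITION & SPEC =====
def Spec_one_to_one (d : List (String × Int)) (out : Bool) : Prop := out = one_to_one_alt d
instance (d : List (String × Int)) (out : Bool) : Decidable (Spec_one_to_one d out) := by unfold Spec_one_to_one; infer_instance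

-- ===== CLAIM (what is proved, stated in full; the proofs are below) =====
def Claim_equal_one_to_one : Prop := ∀ (d : List (String × Int)), Dom_one_to_one d → Spec_one_to_one d (one_to_one d)

-- ===== LEMMAS AND PROOFS =====
theorem go_iff (vs acc : List Int) :
    one_to_one_go acc vs = true ↔ (∀ v ∈ vs, v ∉ acc) ∧ vs.Nodup := by
  induction vs generalizing acc with
  | nil => simp [one_to_one_go]
  | cons v rest ih =>
    by_cases h : v ∈ acc
    · simp [one_to_one_go, h]
    · simp only [one_to_one_go, List.contains_iff_mem, h, if_false]
      rw [ih]
      simp only [List.mem_cons, List.mem_append, List.nodup_cons]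
      constructor
      · rintro ⟨h1, h2⟩
        refine ⟨?_, ?_, h2⟩
        · intro x hx
          rcases hx with rfl | hx
          · exact h
          · exact fun hm => h1 x hx (Or.inl hm)
        · exact fun hv => (h1 v hv) (Or.inr (by simp))
      · rintro ⟨h1, h2, h3⟩
        refine ⟨?_, h3⟩
        intro x hx hm
        rcases hm with hm | hm
        · exact h1 x (Or.inr hx) hm
        · simp at hm; exact h2 (hm ▸ hx)

theorem foldl_add_len_le (xs : List Int) : ∀ s : PySem.Set Int,
    (xs.foldl PySem.Set.add s).length ≤ s.length + xs.length := by
  induction xs with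
  | nil => intro s; simp
  | cons x xs ih =>
    intro s
    have h := ih (PySem.Set.add s x)
    have hlen : (PySem.Set.add s x).length ≤ s.length + 1 := by
      unfold PySem.Set.add
      split <;> simp
    simp only [List.foldl_cons, List.length_cons]
    omega

theorem foldl_add_len_iff (xs : List Int) : ∀ s : PySem.Set Int,
    ((xs.foldl PySem.Set.add s).length = s.length + xs.length) ↔
      ((∀ v ∈ xs, v ∉ s) ∧ xs.Nodup) := by
  induction xs with
  | nil => intro s; simp
  | cons x xs ih =>
    intro s
    by_cases h : x ∈ s
    · have hadd : PySem.Set.add s x = s := by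
        unfold PySem.Set.add
        simp [h]
      have hle := foldl_add_len_le xs s
      simp only [List.foldl_cons, hadd, List.length_cons]
      constructor
      · intro he; omega
      · rintro ⟨h1, _⟩; exact absurd h (h1 x (by simp))
    · have hadd : PySem.Set.add s x = s ++ [x] := by
        unfold PySem.Set.add
        simp [h]
      have key := ih (s ++ [x])
      simp only [List.foldl_cons, hadd, List.length_cons]
      rw [show s.length + (xs.length + 1) = (s ++ [x]).length + xs.length from by simp; omega]
      rw [key]
      simp only [List.mem_cons, List.mem_append, List.nodup_cons]
      constructor
      · rintro ⟨h1, h2⟩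
        refine ⟨?_, ?_, h2⟩
        · intro v hv
          rcases hv with rfl | hv
          · exact h
          · exact fun hm => h1 v hv (Or.inl hm)
        · exact fun hv => (h1 x hv) (Or.inr (by simp))
      · rintro ⟨h1, h2, h3⟩
        refine ⟨?_, h3⟩
        intro v hv hm
        rcases hm with hm | hm
        · exact h1 v (Or.inr hv) hm
        · simp at hm; exact h2 (hm ▸ hv)

theorem alt_iff (d : List (String × Int)) :
    one_to_one_alt d = true ↔ (d.map Prod.snd).Nodup := by
  have h := foldl_add_len_iff (d.map Prod.snd) []
  simp only [List.length_nil, Nat.zero_add, List.not_mem_nil, not_false_iff, implies_true, true_and] at h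
  unfold one_to_one_alt
  rw [beq_iff_eq]
  rw [show d.length = (d.map Prod.snd).length from by simp]
  rw [show PySem.Set.ofList (d.map Prod.snd) = (d.map Prod.snd).foldl PySem.Set.add [] from rfl]
  simp only [PySem.Set.len]
  rw [Int.natCast_inj]
  exact h

-- ===== VERDICT (by name: the statement is the Claim_ definition above) =====
theorem one_to_one_spec : Claim_equal_one_to_one := by
  intro d _
  unfold Spec_one_to_one one_to_one
  rw [Bool.eq_iff_iff, go_iff, alt_iff]
  simp
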